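-- pv_equiv track=rewrite | github.com/Syyan7979/Kattis-Solutions-python- | Python Kattis/Kattis42(pokerhand).py | poker
-- ===== SOURCE A (Python) =====
-- def poker(someList):
-- 	hand = {}
-- 	for i in someList:
-- 		if f"{i[0]}" in hand:
-- 			hand[f"{i[0]}"] += 1
-- 		else:
-- 			hand[f"{i[0]}"] = 1
--
-- 	vals = list(hand.values())
-- 	return max(vals)
-- ===== SOURCE B (Python) =====
-- def poker(someList):
-- 	keys = sorted(f"{i[0]}" for i in someList)
-- 	best = 0
-- 	cur = 0
-- 	prev = None
-- 	for k in keys: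
-- 		cur = cur + 1 if k == prev else 1
-- 		if cur > best:
-- 			best = cur
-- 		prev = k
-- 	return best
-- ===== Notes on version B (the rewrite author's own statement) =====
-- stated objective: alternative
-- what changed: B replaces A's incrementally-maintained count dictionary by sort-then-scan: it sorts the first-element keys and finds the longest run of equal adjacent keys in one linear pass with a running best.
import Mathlib
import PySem

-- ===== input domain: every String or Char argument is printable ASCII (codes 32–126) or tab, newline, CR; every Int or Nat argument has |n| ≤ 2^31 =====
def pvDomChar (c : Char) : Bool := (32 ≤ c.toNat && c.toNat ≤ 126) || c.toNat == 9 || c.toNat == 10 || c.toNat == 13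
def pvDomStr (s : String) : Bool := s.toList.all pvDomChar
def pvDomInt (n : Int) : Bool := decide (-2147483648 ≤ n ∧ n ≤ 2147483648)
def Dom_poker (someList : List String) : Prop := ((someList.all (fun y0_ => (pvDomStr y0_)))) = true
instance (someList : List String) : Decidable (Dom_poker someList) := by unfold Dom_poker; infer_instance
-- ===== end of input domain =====

-- B replaces A's count dictionary by sort-then-scan over the keys (longest run of equal
-- adjacent keys); a different algorithm of similar cost, not claimed faster.

-- f"{i[0]}" : the first character of i as a one-character string
-- (PySem.Str.pyGet? is none exactly where Python raises IndexError; that case is excluded by Pre_poker)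
def pvFstr (i : String) : String :=
  match PySem.Str.pyGet? i 0 with
  | some c => String.ofList [c]
  | none => ""

-- ===== PORT A =====
def poker (someList : List String) : Int :=
  let hand := someList.foldl
    (fun d i =>
      if d.contains (pvFstr i) then d.insert (pvFstr i) (d.getD (pvFstr i) 0 + 1)
      else d.insert (pvFstr i) 1)
    PySem.Dict.empty
  let vals := hand.values
  -- max(vals): ValueError on the empty list, excluded by Pre_poker
  (PySem.List.max? vals (fun x => x)).getD 0

-- ===== PORT B =====
def poker_alt (someList : List String) : Int :=
  let keys := PySem.List.sorted (someList.map pvFstr) (fun x => x) false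
  (keys.foldl
    (fun (s : Int × Int × Option String) k =>
      let cur : Int := if some k == s.2.2 then s.2.1 + 1 else 1
      let best : Int := if cur > s.1 then cur else s.1
      (best, cur, some k))
    ((0 : Int), (0 : Int), (none : Option String))).1

-- ===== PRECONDITION & SPEC =====
-- Pre_ excludes exactly where the Python A raises: the empty list (ValueError from max) and
-- lists containing an empty string (IndexError from i[0]).
def Pre_poker (someList : List String) : Prop :=
  someList ≠ [] ∧ ∀ s ∈ someList, s ≠ ""
instance (someList : List String) : Decidable (Pre_poker someList) := by
  unfold Pre_poker; infer_instance
def pvWitness_poker : List String := ["7H", "7D", "KC"]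

def Spec_poker (someList : List String) (out : Int) : Prop := out = poker_alt someList
instance (someList : List String) (out : Int) : Decidable (Spec_poker someList out) := by
  unfold Spec_poker; infer_instance

-- ===== CLAIM (what is proved, stated in full; the proofs are below) =====
def Claim_equal_poker : Prop := ∀ (someList : List String), Dom_poker someList → Pre_poker someList → Spec_poker someList (poker someList)

-- ===== LEMMAS AND PROOFS =====

-- the scan step of B's loop, named for the proofs
def pvStep (s : Int × Int × Option String) (k : String) : Int × Int × Option String :=
  let cur : Int := if some k == s.2.2 then s.2.1 + 1 else 1
  let best : Int := if cur > s.1 then cur else s.1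
  (best, cur, some k)

-- run-length scan, recursively: current run length c of key p, rest of the (sorted) keys
def pvH (c : Int) (p : String) : List String → Int
  | [] => c
  | k :: r => if k = p then pvH (c + 1) p r else max c (pvH 1 k r)

-- the common spec value: max over distinct keys of their multiplicity
def pvMC (l : List String) : Int :=
  ((PySem.Set.ofList l).map (fun k => ((l.count k : Nat) : Int))).foldl max 0

theorem pvFoldlMax_le (xs : List Int) (a b : Int) (ha : a ≤ b) (hx : ∀ x ∈ xs, x ≤ b) :
    xs.foldl max a ≤ b := by
  induction xs generalizing a with
  | nil => exact ha
  | cons y t ih =>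
    exact ih (max a y) (max_le ha (hx y (by simp))) (fun x hx' => hx x (by simp [hx']))

theorem pvLe_foldlMax (xs : List Int) (a : Int) : a ≤ xs.foldl max a := by
  induction xs generalizing a with
  | nil => simp
  | cons y t ih => exact le_trans (le_max_left a y) (ih (max a y))

theorem pvMem_le_foldlMax (xs : List Int) (a x : Int) (hx : x ∈ xs) : x ≤ xs.foldl max a := by
  induction xs generalizing a with
  | nil => cases hx
  | cons y t ih =>
    rcases List.mem_cons.mp hx with h | h
    · subst h; exact le_trans (le_max_right a x) (pvLe_foldlMax t (max a x))
    · exact ih (max a y) h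

theorem pvMC_nonneg (l : List String) : 0 ≤ pvMC l := pvLe_foldlMax _ 0

theorem pvCount_le_MC (l : List String) (k : String) (hk : k ∈ l) :
    ((l.count k : Nat) : Int) ≤ pvMC l := by
  apply pvMem_le_foldlMax
  exact List.mem_map.mpr ⟨k, (PySem.Set.mem_ofList _ _).mpr hk, rfl⟩

theorem pvMC_le (l : List String) (b : Int) (hb : 0 ≤ b)
    (h : ∀ k ∈ l, ((l.count k : Nat) : Int) ≤ b) : pvMC l ≤ b := by
  apply pvFoldlMax_le _ _ _ hb
  intro x hx
  rcases List.mem_map.mp hx with ⟨k, hk, rfl⟩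
  exact h k ((PySem.Set.mem_ofList _ _).mp hk)

-- pvMC is a function of the multiset of keys
theorem pvMC_perm (l₁ l₂ : List String) (hp : l₁.Perm l₂) : pvMC l₁ = pvMC l₂ := by
  have h : ∀ (a b : List String), a.Perm b → pvMC a ≤ pvMC b := by
    intro a b hab
    apply pvMC_le _ _ (pvMC_nonneg b)
    intro k hk
    rw [hab.count_eq]
    exact pvCount_le_MC b k (hab.mem_iff.mp hk)
  exact le_antisymm (h _ _ hp) (h _ _ hp.symm)

theorem pvMC_cons (k : String) (r : List String) :
    pvMC (k :: r) = max (((r.count k : Nat) : Int) + 1) (pvMC (r.filter (fun x => x ≠ k))) := by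
  apply le_antisymm
  · apply pvMC_le
    · exact le_trans (by positivity) (le_max_left _ _)
    · intro j hj
      by_cases hjk : j = k
      · subst hjk
        apply le_trans _ (le_max_left _ _)
        simp
      · apply le_trans _ (le_max_right _ _)
        have hkj : ¬ k = j := fun hh => hjk hh.symm
        have hjr : j ∈ r := by
          rcases List.mem_cons.mp hj with h | h
          · exact absurd h hjk
          · exact h
        have hcnt : (r.filter (fun x => x ≠ k)).count j = r.count j := by
          apply List.count_filter
          simp [hjk]
        have hck : (k :: r).count j = r.count j := by
          simp [hkj]
        rw [hck, ← hcnt]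
        apply pvCount_le_MC
        exact List.mem_filter.mpr ⟨hjr, by simp [hjk]⟩
  · apply max_le
    · have hc : ((k :: r).count k : Int) = ((r.count k : Nat) : Int) + 1 := by
        simp
      rw [← hc]
      exact pvCount_le_MC (k :: r) k (by simp)
    · apply pvMC_le _ _ (pvMC_nonneg _)
      intro j hj
      rcases List.mem_filter.mp hj with ⟨hjr, hjk⟩
      have hjk' : j ≠ k := by simpa using hjk
      have hcnt : (r.filter (fun x => x ≠ k)).count j = r.count j := by
        apply List.count_filter; simp [hjk']
      rw [hcnt]
      have hsub : r.count j ≤ (k :: r).count j := (List.sublist_cons_self k r).count_le j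
      exact le_trans (by exact_mod_cast hsub) (pvCount_le_MC (k :: r) j (by simp [hjr]))

theorem pvH_ge (l : List String) (c : Int) (p : String) : c ≤ pvH c p l := by
  induction l generalizing c p with
  | nil => simp [pvH]
  | cons k r ih =>
    simp only [pvH]
    split
    · exact le_trans (by omega) (ih (c + 1) p)
    · exact le_max_left _ _

-- the B loop (from its second iteration on) is the recursive run-length scan
theorem pvFoldl_step_eq (l : List String) (b c : Int) (p : String) (hbc : c ≤ b) :
    (l.foldl pvStep (b, c, some p)).1 = max b (pvH c p l) := by
  induction l generalizing b c p with
  | nil => simpa [pvH] using (max_eq_left hbc).symm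
  | cons k r ih =>
    rw [List.foldl_cons]
    by_cases hkp : k = p
    · subst hkp
      have h1 : pvStep (b, c, some k) k = (max b (c + 1), c + 1, some k) := by
        simp [pvStep]; omega
      rw [h1, ih _ _ _ (le_max_right b (c + 1)),
        show pvH c k (k :: r) = pvH (c + 1) k r from by simp [pvH]]
      have hge := pvH_ge r (c + 1) k
      omega
    · have hne : (some k == some p) = false := by simp [hkp]
      have h1 : pvStep (b, c, some p) k = (max b 1, 1, some k) := by
        simp [pvStep, hne]; omega
      rw [h1, ih _ _ _ (le_max_right b 1)]
      simp only [pvH, if_neg hkp]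
      have hge := pvH_ge r 1 k
      omega

-- on a sorted tail the scan value is: current run extended by count, maxed with the rest
theorem pvH_spec (l : List String) (p : String) (c : Int)
    (hs : (p :: l).Pairwise (· ≤ ·)) (hc : 1 ≤ c) :
    pvH c p l = max (c + ((l.count p : Nat) : Int)) (pvMC (l.filter (fun x => x ≠ p))) := by
  induction l generalizing p c with
  | nil =>
    simp only [pvH, List.count_nil, List.filter_nil, Nat.cast_zero, add_zero]
    rw [show pvMC [] = 0 from rfl]
    omega
  | cons k r ih =>
    have hs' : (k :: r).Pairwise (· ≤ ·) := (List.pairwise_cons.mp hs).2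
    by_cases hkp : k = p
    · subst hkp
      simp only [pvH]
      rw [ih k (c + 1) hs' (by omega)]
      have hc1 : (r.count k + 1 : Nat) = (k :: r).count k := by simp
      have hf : (k :: r).filter (fun x => x ≠ k) = r.filter (fun x => x ≠ k) := by simp
      rw [← hc1, hf]
      push_cast
      omega
    · simp only [pvH, if_neg hkp]
      have hpk : p ≤ k := (List.pairwise_cons.mp hs).1 k (by simp)
      have hplt : p < k := lt_of_le_of_ne hpk (fun h => hkp h.symm)
      have hall : ∀ x ∈ k :: r, p < x := by
        intro x hx
        rcases List.mem_cons.mp hx with h | h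
        · subst h; exact hplt
        · exact lt_of_lt_of_le hplt ((List.pairwise_cons.mp hs').1 x h)
      have hcount : (k :: r).count p = 0 := by
        rw [List.count_eq_zero]
        intro hmem
        exact absurd rfl (ne_of_gt (hall p hmem))
      have hfilter : (k :: r).filter (fun x => x ≠ p) = k :: r := by
        apply List.filter_eq_self.mpr
        intro x hx
        simp [ne_of_gt (hall x hx)]
      rw [hcount, hfilter, ih k 1 hs' le_rfl, pvMC_cons k r]
      push_cast
      omega

-- the whole scan on a sorted, nonempty key list computes the max multiplicity
theorem pvScan_sorted (keys : List String) (hne : keys ≠ []) (hs : keys.Pairwise (· ≤ ·)) :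
    (keys.foldl pvStep ((0 : Int), (0 : Int), (none : Option String))).1 = pvMC keys := by
  obtain ⟨k, r, rfl⟩ := List.exists_cons_of_ne_nil hne
  rw [List.foldl_cons]
  have h1 : pvStep ((0 : Int), (0 : Int), (none : Option String)) k = (1, 1, some k) := by
    simp [pvStep]
  rw [h1, pvFoldl_step_eq r 1 1 k le_rfl, pvH_spec r k 1 hs le_rfl, pvMC_cons k r]
  have hge := pvMC_nonneg (r.filter (fun x => x ≠ k))
  omega

-- B's value is pvMC of its sorted key list
theorem poker_alt_eq_pvMC (someList : List String) (h : someList ≠ []) :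
    poker_alt someList
      = pvMC (PySem.List.sorted (someList.map pvFstr) (fun x => x) false) := by
  show (List.foldl pvStep ((0 : Int), (0 : Int), (none : Option String))
      (PySem.List.sorted (someList.map pvFstr) (fun x => x) false)).1 = _
  apply pvScan_sorted
  · simpa [PySem.List.sorted_eq_nil_iff] using h
  · exact PySem.List.sorted_pairwise _ _

-- max(vals) over the counter's values is pvMC
theorem pvMaxCounts (l : List String) (hne : l ≠ []) :
    (PySem.List.max? ((PySem.Set.ofList l).map (fun k => ((l.count k : Nat) : Int)))
      (fun x => x)).getD 0 = pvMC l := by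
  obtain ⟨k0, hk0⟩ := List.exists_mem_of_ne_nil l hne
  have hsne : (PySem.Set.ofList l).map (fun k => ((l.count k : Nat) : Int)) ≠ [] := by
    intro hcon
    have hm : k0 ∈ PySem.Set.ofList l := (PySem.Set.mem_ofList _ _).mpr hk0
    rw [List.map_eq_nil_iff] at hcon
    rw [hcon] at hm
    cases hm
  obtain ⟨v, vt, hv⟩ := List.exists_cons_of_ne_nil hsne
  have hv0 : 0 ≤ v := by
    have hmem : v ∈ (PySem.Set.ofList l).map (fun k => ((l.count k : Nat) : Int)) := by
      rw [hv]; simp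
    rcases List.mem_map.mp hmem with ⟨j, _, rfl⟩
    positivity
  rw [hv, PySem.List.max?_id_cons, Option.getD_some]
  unfold pvMC
  rw [hv, List.foldl_cons, max_eq_right hv0]

-- A's loop body is the counter-insert step: when the key is absent its stored count is the default 0.
theorem pvAStep_eq (d : PySem.Dict String Int) (i : String) :
    (if d.contains (pvFstr i) then d.insert (pvFstr i) (d.getD (pvFstr i) 0 + 1)
     else d.insert (pvFstr i) 1)
    = d.insert (pvFstr i) (d.getD (pvFstr i) 0 + 1) := by
  by_cases h : d.contains (pvFstr i) = true
  · simp [h]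
  · have h' : d.contains (pvFstr i) = false := by
      cases hb : d.contains (pvFstr i) <;> simp_all
    rw [if_neg (by simp [h']), PySem.Dict.getD_of_not_contains d 0 h', zero_add]

-- A's value is pvMC of its (unsorted) key list
theorem poker_eq_pvMC (someList : List String) (h : someList ≠ []) :
    poker someList = pvMC (someList.map pvFstr) := by
  unfold poker
  have hstep : (fun (d : PySem.Dict String Int) i =>
      if d.contains (pvFstr i) then d.insert (pvFstr i) (d.getD (pvFstr i) 0 + 1)
      else d.insert (pvFstr i) 1)
      = fun d i => d.insert (pvFstr i) (d.getD (pvFstr i) 0 + 1) :=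
    funext fun d => funext fun i => pvAStep_eq d i
  rw [hstep]
  rw [show List.foldl (fun (d : PySem.Dict String Int) i => d.insert (pvFstr i) (d.getD (pvFstr i) 0 + 1))
        PySem.Dict.empty someList
      = List.foldl (fun d x => d.insert x (d.getD x 0 + 1)) PySem.Dict.empty (someList.map pvFstr) from
    (@List.foldl_map String String (PySem.Dict String Int) pvFstr
      (fun d x => d.insert x (d.getD x 0 + 1)) someList PySem.Dict.empty).symm]
  rw [PySem.Dict.foldl_insert_getD_add_one_eq_counter]
  show (PySem.List.max? (PySem.Dict.counter (someList.map pvFstr)).values (fun x => x)).getD 0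
      = pvMC (someList.map pvFstr)
  rw [show (PySem.Dict.counter (someList.map pvFstr)).values
      = (PySem.Set.ofList (someList.map pvFstr)).map
          (fun k => (((someList.map pvFstr).count k : Nat) : Int)) from by
    simp [PySem.Dict.values, PySem.Dict.items_counter, List.map_map, Function.comp_def]]
  exact pvMaxCounts _ (by simpa using h)

-- ===== VERDICT (by name: the statement is the Claim_ definition above) =====
theorem poker_spec : Claim_equal_poker := by
  intro someList _ hpre
  unfold Spec_poker
  rw [poker_eq_pvMC someList hpre.1, poker_alt_eq_pvMC someList hpre.1]
  exact pvMC_perm _ _ (PySem.List.sorted_perm _ _ _).symm
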